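-- pv_equiv track=rewrite | github.com/OpenNeuroOrg/dashboard | scripts/check_s3_files.py | compute_context
-- ===== SOURCE A (Python) =====
-- def compute_context(sorted_files: list[str], changed: set[str], radius: int = 3) -> list[str]:
--     """Compute context files within `radius` sorted positions of any changed file."""
--     context = set()
--     for i, f in enumerate(sorted_files):
--         if f in changed:
--             for j in range(max(0, i - radius), min(len(sorted_files), i + radius + 1)):
--                 neighbor = sorted_files[j]
--                 if neighbor not in changed:
--                     context.add(neighbor)
--     return sorted(context)
-- ===== SOURCE B (Python) =====
-- def compute_context(sorted_files: list[str], changed: set[str], radius: int = 3) -> list[str]: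
--     """Compute context files within `radius` sorted positions of any changed file."""
--     def fwd(flags):
--         out, prev = [], None
--         for c in flags:
--             prev = 0 if c else (prev + 1 if prev is not None else None)
--             out.append(prev)
--         return out
--
--     def near(d):
--         return d is not None and d <= radius
--
--     flags = [f in changed for f in sorted_files]
--     before = fwd(flags)                    # distance to nearest changed file at or before each index
--     after = fwd(flags[::-1])[::-1]         # distance to nearest changed file at or after each index
--     result = set()
--     for f, c, db, da in zip(sorted_files, flags, before, after):
--         if not c and (near(db) or near(da)):
--             result.add(f)
--     return sorted(result)
-- ===== Notes on version B (the rewrite author's own statement) =====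
-- stated objective: faster
-- what changed: Replaces A's per-changed-file window expansion (each changed index rescans up to 2*radius+1 neighbors) with two linear passes computing each index's distance to the nearest changed file before/after it, then one pass collecting files whose distance is within radius.
import Mathlib
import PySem

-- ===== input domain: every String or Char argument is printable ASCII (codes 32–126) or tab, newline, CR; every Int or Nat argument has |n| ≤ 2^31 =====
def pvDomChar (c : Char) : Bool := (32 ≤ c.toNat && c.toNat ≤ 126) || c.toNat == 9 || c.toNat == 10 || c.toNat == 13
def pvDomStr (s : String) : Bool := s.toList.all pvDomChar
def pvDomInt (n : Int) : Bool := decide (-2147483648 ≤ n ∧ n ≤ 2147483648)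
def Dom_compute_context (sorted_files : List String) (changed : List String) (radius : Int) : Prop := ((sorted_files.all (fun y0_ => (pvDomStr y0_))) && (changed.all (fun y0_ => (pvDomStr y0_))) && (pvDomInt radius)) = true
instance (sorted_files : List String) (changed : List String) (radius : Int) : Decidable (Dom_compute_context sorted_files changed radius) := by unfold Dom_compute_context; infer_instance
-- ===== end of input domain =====

-- B replaces A's per-changed-file window expansion by two linear nearest-changed-distance passes plus one collection pass (faster when radius is large).

-- ===== PORT A =====
def compute_context (sorted_files : List String) (changed : List String) (radius : Int) : List String :=
  let context : PySem.Set String :=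
    (PySem.List.enumerate sorted_files 0).foldl
      (fun ctx p =>
        if p.2 ∈ changed then
          (PySem.List.pyRange (max 0 (p.1 - radius)) (min (sorted_files.length : Int) (p.1 + radius + 1)) 1).foldl
            (fun ctx2 j =>
              let neighbor := PySem.List.pyGetD sorted_files j ""
              if neighbor ∈ changed then ctx2 else PySem.Set.add ctx2 neighbor)
            ctx
        else ctx)
      PySem.Set.empty
  PySem.List.sorted context (fun x => x) false

-- ===== PORT B =====
-- forward pass: at each position, distance to nearest True at or before it (none = no True yet)
def pvFwd : List Bool → Option Nat → List (Option Nat)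
  | [], _ => []
  | c :: cs, prev =>
    let d := if c then some 0 else prev.map (· + 1)
    d :: pvFwd cs d

def pvNear (d : Option Nat) (radius : Int) : Bool :=
  match d with
  | some k => decide ((k : Int) ≤ radius)
  | none => false

def compute_context_alt (sorted_files : List String) (changed : List String) (radius : Int) : List String :=
  let flags := sorted_files.map (fun f => decide (f ∈ changed))
  let before := pvFwd flags none
  let after := (pvFwd flags.reverse none).reverse
  let result : PySem.Set String :=
    (sorted_files.zip (flags.zip (before.zip after))).foldl
      (fun s q =>
        if !q.2.1 && (pvNear q.2.2.1 radius || pvNear q.2.2.2 radius) then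
          PySem.Set.add s q.1
        else s)
      PySem.Set.empty
  PySem.List.sorted result (fun x => x) false

-- ===== PRECONDITION & SPEC =====
def Spec_compute_context (sorted_files : List String) (changed : List String) (radius : Int) (out : List String) : Prop := out = compute_context_alt sorted_files changed radius
instance (sorted_files : List String) (changed : List String) (radius : Int) (out : List String) : Decidable (Spec_compute_context sorted_files changed radius out) := by unfold Spec_compute_context; infer_instance

-- ===== CLAIM (what is proved, stated in full; the proofs are below) =====
def Claim_equal_compute_context : Prop := ∀ (sorted_files : List String) (changed : List String) (radius : Int), Dom_compute_context sorted_files changed radius → Spec_compute_context sorted_files changed radius (compute_context sorted_files changed radius)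

-- ===== LEMMAS AND PROOFS =====

-- the common characterization: x is a context file
def CtxP (files : List String) (changed : List String) (radius : Int) (x : String) : Prop :=
  x ∉ changed ∧ ∃ j : Nat, j < files.length ∧ files[j]? = some x ∧
    ∃ i : Nat, i < files.length ∧ (∃ g, files[i]? = some g ∧ g ∈ changed) ∧
      (i : Int) - j ≤ radius ∧ (j : Int) - i ≤ radius

-- generic fold-membership lemma
theorem mem_foldl_step {ι : Type} (step : PySem.Set String → ι → PySem.Set String)
    (Q : ι → Prop) (x : String)
    (h : ∀ s e, x ∈ step s e ↔ x ∈ s ∨ Q e) :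
    ∀ (l : List ι) (init : PySem.Set String),
      x ∈ l.foldl step init ↔ x ∈ init ∨ ∃ e ∈ l, Q e := by
  intro l
  induction l with
  | nil => simp
  | cons e l ih =>
    intro init
    simp only [List.foldl_cons, ih, h, List.mem_cons]
    constructor
    · rintro ((hx | hq) | ⟨e', he', hq⟩)
      · exact Or.inl hx
      · exact Or.inr ⟨e, Or.inl rfl, hq⟩
      · exact Or.inr ⟨e', Or.inr he', hq⟩
    · rintro (hx | ⟨e', (rfl | he'), hq⟩)
      · exact Or.inl (Or.inl hx)
      · exact Or.inl (Or.inr hq)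
      · exact Or.inr ⟨e', he', hq⟩

theorem nodup_foldl_step {ι : Type} (step : PySem.Set String → ι → PySem.Set String)
    (h : ∀ s e, s.Nodup → (step s e).Nodup) :
    ∀ (l : List ι) (init : PySem.Set String), init.Nodup → (l.foldl step init).Nodup := by
  intro l
  induction l with
  | nil => intro init hi; simpa using hi
  | cons e l ih => intro init hi; exact ih _ (h _ _ hi)

theorem pvFwd_length (flags : List Bool) (prev : Option Nat) :
    (pvFwd flags prev).length = flags.length := by
  induction flags generalizing prev with
  | nil => rfl
  | cons c cs ih => simp [pvFwd, ih]

theorem pvFwd_spec (r : Int) :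
    ∀ (flags : List Bool) (prev : Option Nat) (j : Nat) (d : Option Nat),
      (pvFwd flags prev)[j]? = some d →
      (pvNear d r = true ↔
        ((∃ i : Nat, i ≤ j ∧ flags[i]? = some true ∧ (j : Int) - i ≤ r) ∨
         (∃ p, prev = some p ∧ (j : Int) + 1 + p ≤ r))) := by
  intro flags
  induction flags with
  | nil => intro prev j d h; simp [pvFwd] at h
  | cons c cs ih =>
    intro prev j d h
    cases j with
    | zero =>
      simp only [pvFwd, List.getElem?_cons_zero, Option.some_inj] at h
      subst h
      constructor
      · intro h0
        by_cases hc : c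
        · refine Or.inl ⟨0, le_refl 0, by simp [hc], ?_⟩
          simp [hc, pvNear] at h0
          omega
        · cases hp : prev with
          | none => rw [hp] at h0; simp [hc, pvNear] at h0
          | some p =>
            rw [hp] at h0
            simp [hc, pvNear] at h0
            exact Or.inr ⟨p, rfl, by omega⟩
      · rintro (⟨i, hi, hf, hle⟩ | ⟨p, hp, hle⟩)
        · interval_cases i
          simp at hf
          simp [hf, pvNear]
          omega
        · subst hp
          by_cases hc : c <;> simp [hc, pvNear] <;> omega
    | succ j' =>
      simp only [pvFwd, List.getElem?_cons_succ] at h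
      rw [ih _ j' d h]
      constructor
      · rintro (⟨i, hij, hf, hle⟩ | ⟨p, hp, hle⟩)
        · exact Or.inl ⟨i + 1, by omega, by simpa using hf, by push_cast at hle ⊢; omega⟩
        · by_cases hc : c
          · simp [hc] at hp
            exact Or.inl ⟨0, by omega, by simp [hc], by push_cast; omega⟩
          · cases hp0 : prev with
            | none => rw [hp0] at hp; simp [hc] at hp
            | some p0 =>
              rw [hp0] at hp
              simp [hc] at hp
              exact Or.inr ⟨p0, rfl, by push_cast at hle ⊢; omega⟩
      · rintro (⟨i, hij, hf, hle⟩ | ⟨p, hp, hle⟩)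
        · cases i with
          | zero =>
            simp at hf
            refine Or.inr ⟨0, by simp [hf], ?_⟩
            push_cast at hle ⊢; omega
          | succ i' =>
            exact Or.inl ⟨i', by omega, by simpa using hf, by push_cast at hle ⊢; omega⟩
        · subst hp
          by_cases hc : c
          · refine Or.inr ⟨0, by simp [hc], ?_⟩
            push_cast at hle ⊢; omega
          · refine Or.inr ⟨p + 1, by simp [hc], ?_⟩
            push_cast at hle ⊢; omega

-- A's set membership
theorem memA (files changed : List String) (radius : Int) (x : String) :
    x ∈ (PySem.List.enumerate files 0).foldl
      (fun ctx p =>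
        if p.2 ∈ changed then
          (PySem.List.pyRange (max 0 (p.1 - radius)) (min (files.length : Int) (p.1 + radius + 1)) 1).foldl
            (fun ctx2 j =>
              if PySem.List.pyGetD files j "" ∈ changed then ctx2
              else PySem.Set.add ctx2 (PySem.List.pyGetD files j ""))
            ctx
        else ctx)
      PySem.Set.empty
    ↔ CtxP files changed radius x := by
  have hinner : ∀ (s : PySem.Set String) (j : Int),
      x ∈ (if PySem.List.pyGetD files j "" ∈ changed then s
           else PySem.Set.add s (PySem.List.pyGetD files j "")) ↔
      x ∈ s ∨ (PySem.List.pyGetD files j "" ∉ changed ∧ x = PySem.List.pyGetD files j "") := by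
    intro s j
    by_cases hn : PySem.List.pyGetD files j "" ∈ changed
    · simp [hn]
    · simp [hn, PySem.Set.mem_add]
  have houter : ∀ (s : PySem.Set String) (p : Int × String),
      x ∈ (if p.2 ∈ changed then
            (PySem.List.pyRange (max 0 (p.1 - radius)) (min (files.length : Int) (p.1 + radius + 1)) 1).foldl
              (fun ctx2 j =>
                if PySem.List.pyGetD files j "" ∈ changed then ctx2
                else PySem.Set.add ctx2 (PySem.List.pyGetD files j ""))
              s
           else s) ↔
      x ∈ s ∨ (p.2 ∈ changed ∧
        ∃ j ∈ PySem.List.pyRange (max 0 (p.1 - radius)) (min (files.length : Int) (p.1 + radius + 1)) 1,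
          PySem.List.pyGetD files j "" ∉ changed ∧ x = PySem.List.pyGetD files j "") := by
    intro s p
    by_cases hc : p.2 ∈ changed
    · rw [if_pos hc, mem_foldl_step _ _ x hinner]
      simp [hc]
    · simp [hc]
  rw [mem_foldl_step _ _ x houter]
  have hempty : x ∉ (PySem.Set.empty : PySem.Set String) := by simp [PySem.Set.empty]
  simp only [hempty, false_or]
  constructor
  · rintro ⟨p, hp, hchanged, j, hjmem, hnot, hx⟩
    rw [PySem.List.mem_enumerate_iff] at hp
    obtain ⟨k, hk, rfl⟩ := hp
    simp only [] at hchanged hjmem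
    rw [PySem.List.mem_pyRange_one] at hjmem
    have hj0 : 0 ≤ j := le_trans (le_max_left 0 _) hjmem.1
    have hjn : j < (files.length : Int) := lt_of_lt_of_le hjmem.2 (min_le_left _ _)
    have hjnat : j.toNat < files.length := by omega
    have hgd : PySem.List.pyGetD files j "" = files[j.toNat] := by
      rw [PySem.List.pyGetD_of_nonneg files "" hj0, List.getD_eq_getElem?_getD,
        List.getElem?_eq_getElem hjnat]
      rfl
    rw [hgd] at hnot hx
    subst hx
    refine ⟨hnot, j.toNat, hjnat, List.getElem?_eq_getElem hjnat, k, hk,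
      ⟨files[k], List.getElem?_eq_getElem hk, hchanged⟩, ?_, ?_⟩
    · omega
    · omega
  · rintro ⟨hx, j, hj, hjx, i, hi, ⟨g, hg, hgc⟩, h1, h2⟩
    have hgi : files[i] = g := by
      rw [List.getElem?_eq_getElem hi] at hg
      exact Option.some_inj.mp hg
    have hjfx : files[j] = x := by
      rw [List.getElem?_eq_getElem hj] at hjx
      exact Option.some_inj.mp hjx
    have hgd : PySem.List.pyGetD files (j : Int) "" = files[j] := by
      rw [PySem.List.pyGetD_of_nonneg files "" (Int.natCast_nonneg j), Int.toNat_natCast,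
        List.getD_eq_getElem?_getD, List.getElem?_eq_getElem hj]
      rfl
    refine ⟨((0 : Int) + i, files[i]), ?_, ?_, (j : Int), ?_, ?_, ?_⟩
    · rw [PySem.List.mem_enumerate_iff]
      exact ⟨i, hi, rfl⟩
    · simpa [hgi] using hgc
    · rw [PySem.List.mem_pyRange_one]
      constructor
      · simp only []
        omega
      · simp only []
        omega
    · rw [hgd, hjfx]
      exact hx
    · rw [hgd, hjfx]

-- B's set membership
theorem memB (files changed : List String) (radius : Int) (x : String) :
    x ∈ (files.zip ((files.map (fun f => decide (f ∈ changed))).zip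
          ((pvFwd (files.map (fun f => decide (f ∈ changed))) none).zip
           (pvFwd (files.map (fun f => decide (f ∈ changed))).reverse none).reverse))).foldl
      (fun s q =>
        if !q.2.1 && (pvNear q.2.2.1 radius || pvNear q.2.2.2 radius) then
          PySem.Set.add s q.1
        else s)
      PySem.Set.empty
    ↔ CtxP files changed radius x := by
  have hstep : ∀ (s : PySem.Set String) (q : String × (Bool × (Option Nat × Option Nat))),
      x ∈ (if !q.2.1 && (pvNear q.2.2.1 radius || pvNear q.2.2.2 radius) then
             PySem.Set.add s q.1
           else s) ↔
      x ∈ s ∨ ((!q.2.1 && (pvNear q.2.2.1 radius || pvNear q.2.2.2 radius)) = true ∧ x = q.1) := by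
    intro s q
    by_cases hb : (!q.2.1 && (pvNear q.2.2.1 radius || pvNear q.2.2.2 radius)) = true
    · simp [hb, PySem.Set.mem_add]
    · simp [hb]
  rw [mem_foldl_step _ _ x hstep]
  have hempty : x ∉ (PySem.Set.empty : PySem.Set String) := by simp [PySem.Set.empty]
  simp only [hempty, false_or]
  -- abbreviations
  have hlenf : (files.map (fun f => decide (f ∈ changed))).length = files.length := by simp
  have hlenF : (pvFwd (files.map (fun f => decide (f ∈ changed))) none).length = files.length := by
    rw [pvFwd_length, hlenf]
  have hlenR : ((pvFwd (files.map (fun f => decide (f ∈ changed))).reverse none).reverse).length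
      = files.length := by
    simp [pvFwd_length]
  have hflag? : ∀ (i : Nat), (files.map (fun f => decide (f ∈ changed)))[i]? = some true ↔
      (∃ g, files[i]? = some g ∧ g ∈ changed) := by
    intro i
    rw [List.getElem?_map]
    cases hfi : files[i]? with
    | none => simp
    | some g =>
      simp only [Option.map_some, Option.some_inj]
      constructor
      · intro hdec; exact ⟨g, rfl, of_decide_eq_true hdec⟩
      · rintro ⟨g', hg', hmem⟩
        subst hg'
        exact decide_eq_true hmem
  constructor
  · rintro ⟨q, hq, hcond, hx⟩
    rw [List.mem_iff_getElem] at hq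
    obtain ⟨t, ht, rfl⟩ := hq
    have htn : t < files.length := by
      simpa [hlenf, hlenF, hlenR] using ht
    rw [List.getElem_zip, List.getElem_zip, List.getElem_zip] at hcond hx
    simp only [List.getElem_map] at hcond hx
    rw [Bool.and_eq_true, Bool.or_eq_true, Bool.not_eq_eq_eq_not, Bool.not_true] at hcond
    obtain ⟨hflagf, hnear⟩ := hcond
    have hxnot : x ∉ changed := by
      rw [hx]
      intro hmem
      simp [decide_eq_true hmem] at hflagf
    refine ⟨hxnot, t, htn, ?_, ?_⟩
    · rw [hx, List.getElem?_eq_getElem htn]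
    · rcases hnear with hnf | hnb
      · -- forward distance
        have hsome : (pvFwd (files.map (fun f => decide (f ∈ changed))) none)[t]? =
            some ((pvFwd (files.map (fun f => decide (f ∈ changed))) none)[t]'(by omega)) :=
          List.getElem?_eq_getElem (by omega)
        rw [pvFwd_spec radius _ none t _ hsome] at hnf
        rcases hnf with ⟨i, hit, hfi, hle⟩ | ⟨p, hp, _⟩
        · obtain ⟨g, hg, hgc⟩ := (hflag? i).mp hfi
          have hin : i < files.length := by
            have := List.getElem?_eq_some_iff.mp hg
            exact this.1
          exact ⟨i, hin, ⟨g, hg, hgc⟩, by omega, hle⟩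
        · exact absurd hp (by simp)
      · -- backward distance
        have hrt : files.length - 1 - t <
            (pvFwd (files.map (fun f => decide (f ∈ changed))).reverse none).length := by
          simp [pvFwd_length]
          omega
        have hrevget : ((pvFwd (files.map (fun f => decide (f ∈ changed))).reverse none).reverse)[t]'(by omega)
            = (pvFwd (files.map (fun f => decide (f ∈ changed))).reverse none)[files.length - 1 - t]'hrt := by
          rw [List.getElem_reverse]
          congr 1
          simp [pvFwd_length]
        rw [hrevget] at hnb
        have hsome := List.getElem?_eq_getElem hrt
        rw [pvFwd_spec radius _ none _ _ hsome] at hnb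
        rcases hnb with ⟨i', hit', hfi', hle'⟩ | ⟨p, hp, _⟩
        · have hi'n : i' < (files.map (fun f => decide (f ∈ changed))).length := by
            rw [hlenf]; omega
          rw [List.getElem?_reverse hi'n] at hfi'
          obtain ⟨g, hg, hgc⟩ := (hflag? _).mp hfi'
          have hin : (files.map (fun f => decide (f ∈ changed))).length - 1 - i' < files.length := by
            rw [hlenf]; omega
          refine ⟨(files.map (fun f => decide (f ∈ changed))).length - 1 - i', hin, ⟨g, hg, hgc⟩, ?_, ?_⟩
          · rw [hlenf] at *
            omega
          · rw [hlenf] at *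
            omega
        · exact absurd hp (by simp)
  · rintro ⟨hx, j, hj, hjx, i, hi, ⟨g, hg, hgc⟩, h1, h2⟩
    have hjfx : files[j] = x := by
      rw [List.getElem?_eq_getElem hj] at hjx
      exact Option.some_inj.mp hjx
    have hzlen : (files.zip ((files.map (fun f => decide (f ∈ changed))).zip
          ((pvFwd (files.map (fun f => decide (f ∈ changed))) none).zip
           (pvFwd (files.map (fun f => decide (f ∈ changed))).reverse none).reverse))).length
        = files.length := by
      simp [pvFwd_length]
    refine ⟨_, List.getElem_mem (by rw [hzlen]; exact hj), ?_, ?_⟩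
    · -- the condition holds at index j
      rw [List.getElem_zip, List.getElem_zip, List.getElem_zip]
      simp only [List.getElem_map]
      rw [Bool.and_eq_true, Bool.or_eq_true, Bool.not_eq_eq_eq_not, Bool.not_true]
      constructor
      · rw [hjfx]
        exact decide_eq_false hx
      · by_cases hij : i ≤ j
        · left
          have hsome : (pvFwd (files.map (fun f => decide (f ∈ changed))) none)[j]? =
              some ((pvFwd (files.map (fun f => decide (f ∈ changed))) none)[j]'(by omega)) :=
            List.getElem?_eq_getElem (by omega)
          rw [pvFwd_spec radius _ none j _ hsome]
          refine Or.inl ⟨i, hij, (hflag? i).mpr ⟨g, hg, hgc⟩, by omega⟩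
        · right
          have hrt : files.length - 1 - j <
              (pvFwd (files.map (fun f => decide (f ∈ changed))).reverse none).length := by
            simp [pvFwd_length]
            omega
          have hrevget : ((pvFwd (files.map (fun f => decide (f ∈ changed))).reverse none).reverse)[j]'(by omega)
              = (pvFwd (files.map (fun f => decide (f ∈ changed))).reverse none)[files.length - 1 - j]'hrt := by
            rw [List.getElem_reverse]
            congr 1
            simp [pvFwd_length]
          rw [hrevget]
          have hsome := List.getElem?_eq_getElem hrt
          rw [pvFwd_spec radius _ none _ _ hsome]
          have hirev : files.length - 1 - i < (files.map (fun f => decide (f ∈ changed))).length := by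
            rw [hlenf]; omega
          refine Or.inl ⟨files.length - 1 - i, by omega, ?_, by omega⟩
          rw [List.getElem?_reverse (by rw [hlenf]; omega)]
          have : (files.map (fun f => decide (f ∈ changed))).length - 1 - (files.length - 1 - i) = i := by
            rw [hlenf]; omega
          rw [this]
          exact (hflag? i).mpr ⟨g, hg, hgc⟩
    · -- x equals the file at index j
      rw [List.getElem_zip]
      exact hjfx.symm

-- ===== VERDICT (by name: the statement is the Claim_ definition above) =====
theorem compute_context_spec : Claim_equal_compute_context := by
  intro files changed radius _
  unfold Spec_compute_context compute_context compute_context_alt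
  have nodupA : ((PySem.List.enumerate files 0).foldl
      (fun ctx p =>
        if p.2 ∈ changed then
          (PySem.List.pyRange (max 0 (p.1 - radius)) (min (files.length : Int) (p.1 + radius + 1)) 1).foldl
            (fun ctx2 j =>
              if PySem.List.pyGetD files j "" ∈ changed then ctx2
              else PySem.Set.add ctx2 (PySem.List.pyGetD files j ""))
            ctx
        else ctx)
      PySem.Set.empty).Nodup := by
    refine nodup_foldl_step _ ?_ _ _ List.nodup_nil
    intro s p hs
    split_ifs with h
    · refine nodup_foldl_step _ ?_ _ _ hs
      intro s2 j hs2
      split_ifs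
      · exact hs2
      · exact PySem.Set.nodup_add _ _ hs2
    · exact hs
  have nodupB : ((files.zip ((files.map (fun f => decide (f ∈ changed))).zip
          ((pvFwd (files.map (fun f => decide (f ∈ changed))) none).zip
           (pvFwd (files.map (fun f => decide (f ∈ changed))).reverse none).reverse))).foldl
      (fun s q =>
        if !q.2.1 && (pvNear q.2.2.1 radius || pvNear q.2.2.2 radius) then
          PySem.Set.add s q.1
        else s)
      PySem.Set.empty).Nodup := by
    refine nodup_foldl_step _ ?_ _ _ List.nodup_nil
    intro s q hs
    split_ifs
    · exact PySem.Set.nodup_add _ _ hs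
    · exact hs
  have hperm := (List.perm_ext_iff_of_nodup nodupA nodupB).mpr
    (fun a => (memA files changed radius a).trans (memB files changed radius a).symm)
  exact PySem.List.sorted_eq_sorted_of_perm _ _ (fun x => x) (fun a b hab => hab) hperm
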